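-- pv_equiv track=rewrite | github.com/ChisBread/pizero-usb-box | pi0usbbox/pi0hid/ducky.py | get_latest_tok
-- ===== SOURCE A (Python) =====
-- def get_latest_tok(line):
--     tok = ''
--     for s in line.split(' '):
--         s.strip(' ')
--         if not s:
--             continue
--         tok = s
--     return tok
-- ===== SOURCE B (Python) =====
-- def get_latest_tok(line):
--     return line.rstrip(' ').rpartition(' ')[2]
-- ===== Notes on version B (the rewrite author's own statement) =====
-- stated objective: idiomatic
-- what changed: Replaces the left-to-right loop over the space-split pieces that keeps the last non-empty token with a loopless right-anchored expression: strip trailing spaces, then take everything after the last remaining space via rpartition.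
import Mathlib
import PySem

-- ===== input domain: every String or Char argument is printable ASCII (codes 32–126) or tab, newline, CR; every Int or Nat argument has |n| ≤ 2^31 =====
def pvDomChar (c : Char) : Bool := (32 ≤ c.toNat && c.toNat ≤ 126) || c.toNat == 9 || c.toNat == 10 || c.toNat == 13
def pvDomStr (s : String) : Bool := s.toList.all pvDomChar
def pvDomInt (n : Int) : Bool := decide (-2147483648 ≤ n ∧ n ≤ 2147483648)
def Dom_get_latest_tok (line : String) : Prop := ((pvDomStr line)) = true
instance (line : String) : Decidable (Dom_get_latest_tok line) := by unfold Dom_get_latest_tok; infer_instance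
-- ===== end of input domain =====

-- B replaces A's left-to-right loop over the space-split pieces with a loopless
-- right-anchored rstrip + rpartition expression (idiomatic; same cost).

-- ===== PORT A =====
def get_latest_tok (line : String) : String :=
  ((PySem.Str.split? line " ").getD []).foldl
    (fun tok s => if s = "" then tok else s) ""

-- ===== PORT B =====
-- line.rstrip(' '): drop the trailing run of spaces (hand port, exact: ' ' only)
def pvRstripSpace (s : String) : String :=
  String.ofList ((s.toList.reverse.dropWhile (fun c => c == ' ')).reverse)
-- t.rpartition(' ')[2]: the suffix after the last space, the whole string if there is none (hand port, exact)
def pvAfterLastSpace (t : String) : String :=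
  String.ofList ((t.toList.reverse.takeWhile (fun c => !(c == ' '))).reverse)
def get_latest_tok_alt (line : String) : String :=
  pvAfterLastSpace (pvRstripSpace line)

-- ===== PRECONDITION & SPEC =====
def Spec_get_latest_tok (line : String) (out : String) : Prop := out = get_latest_tok_alt line
instance (line : String) (out : String) : Decidable (Spec_get_latest_tok line out) := by unfold Spec_get_latest_tok; infer_instance

-- ===== CLAIM (what is proved, stated in full; the proofs are below) =====
def Claim_equal_get_latest_tok : Prop := ∀ (line : String), Dom_get_latest_tok line → Spec_get_latest_tok line (get_latest_tok line)

-- ===== LEMMAS AND PROOFS =====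

/-- Reference single-char-space splitter (structural recursion, no fuel). -/
def pvSplitSp : List Char → List (List Char)
  | [] => [[]]
  | c :: rest =>
    if c = ' ' then [] :: pvSplitSp rest
    else match pvSplitSp rest with
      | [] => [[c]]
      | p :: ps => (c :: p) :: ps

theorem pvSplitSp_ne_nil (cs : List Char) : pvSplitSp cs ≠ [] := by
  cases cs with
  | nil => simp [pvSplitSp]
  | cons c rest =>
    simp only [pvSplitSp]
    split_ifs
    · simp
    · cases h : pvSplitSp rest <;> simp

/-- prepend an accumulator onto the head piece -/
def pvConsHead (pre : List Char) : List (List Char) → List (List Char)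
  | [] => [pre]
  | p :: ps => (pre ++ p) :: ps

theorem pvConsHead_nil (l : List (List Char)) (h : l ≠ []) : pvConsHead [] l = l := by
  cases l with
  | nil => exact absurd rfl h
  | cons p ps => simp [pvConsHead]

theorem pvSplitOn_go_spec : ∀ (fuel : Nat) (l cur : List Char) (acc : List (List Char)),
    l.length ≤ fuel →
    PySem.Chars.splitOn.go [' '] fuel l cur acc
      = acc.reverse ++ pvConsHead cur.reverse (pvSplitSp l) := by
  intro fuel
  induction fuel with
  | zero =>
    intro l cur acc h
    have : l = [] := List.eq_nil_of_length_eq_zero (Nat.le_zero.mp h)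
    subst this
    simp [PySem.Chars.splitOn.go, pvSplitSp, pvConsHead]
  | succ n ih =>
    intro l cur acc h
    cases l with
    | nil => simp [PySem.Chars.splitOn.go, pvSplitSp, pvConsHead]
    | cons c rest =>
      simp only [PySem.Chars.splitOn.go]
      by_cases hc : c = ' '
      · subst hc
        have hpre : [' '].isPrefixOf (' ' :: rest) = true := by
          simp [List.isPrefixOf]
        rw [if_pos hpre]
        have := ih rest [] (cur.reverse :: acc)
          (by simpa using Nat.le_of_succ_le_succ h)
        simp only [List.length_singleton, List.drop_one, List.tail_cons,
          List.reverse_nil] at this ⊢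
        rw [this, pvConsHead_nil _ (pvSplitSp_ne_nil rest)]
        simp [pvSplitSp, pvConsHead]
      · have hpre : [' '].isPrefixOf (c :: rest) = false := by
          simp [List.isPrefixOf]
          intro h'; exact absurd h'.symm hc
        rw [if_neg (by simp [hpre])]
        have := ih rest (c :: cur) acc (by simpa using Nat.le_of_succ_le_succ h)
        rw [this]
        simp only [pvSplitSp, if_neg hc]
        cases hs : pvSplitSp rest with
        | nil => exact absurd hs (pvSplitSp_ne_nil rest)
        | cons p ps => simp [pvConsHead]

theorem pvSplitOn_space (cs : List Char) :
    PySem.Chars.splitOn cs [' '] = pvSplitSp cs := by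
  unfold PySem.Chars.splitOn
  rw [pvSplitOn_go_spec (cs.length + 1) cs [] [] (Nat.le_succ _)]
  simp [pvConsHead_nil _ (pvSplitSp_ne_nil cs)]

/-- the fold keeping the last non-empty element = find? on the reversed list -/
theorem pvFold_eq_find (l : List (List Char)) : ∀ (init : List Char),
    l.foldl (fun tok s => if s = [] then tok else s) init
      = (l.reverse.find? (fun p => !p.isEmpty)).getD init := by
  induction l with
  | nil => intro init; simp
  | cons x xs ih =>
    intro init
    simp only [List.foldl_cons, List.reverse_cons, List.find?_append]
    rw [ih]
    cases h : xs.reverse.find? (fun p => !p.isEmpty) with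
    | some s => simp
    | none =>
      by_cases hx : x = []
      · subst hx; simp
      · have hxe : x.isEmpty = false := by simp [hx]
        simp [List.find?, hxe]
        exact fun h' => absurd h' hx

theorem pvHead_splitSp (rs : List Char) :
    (pvSplitSp rs).headI = rs.takeWhile (fun c => !(c == ' ')) := by
  induction rs with
  | nil => simp [pvSplitSp]
  | cons c r ih =>
    simp only [pvSplitSp]
    by_cases hc : c = ' '
    · subst hc; simp
    · rw [if_neg hc]
      cases hs : pvSplitSp r with
      | nil => exact absurd hs (pvSplitSp_ne_nil r)
      | cons p ps =>
        simp only [List.headI]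
        rw [List.takeWhile_cons, if_pos (by simp [hc])]
        have := ih
        rw [hs] at this
        simp only [List.headI] at this
        rw [this]

theorem pvFind_splitSp (rs : List Char) :
    ((pvSplitSp rs).find? (fun p => !p.isEmpty)).getD []
      = (rs.dropWhile (fun c => c == ' ')).takeWhile (fun c => !(c == ' ')) := by
  induction rs with
  | nil => simp [pvSplitSp, List.find?]
  | cons c r ih =>
    simp only [pvSplitSp]
    by_cases hc : c = ' '
    · subst hc
      rw [if_pos rfl, List.dropWhile_cons]
      simp only [beq_self_eq_true, if_pos]
      rw [← ih]
      simp [List.find?]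
    · rw [if_neg hc, List.dropWhile_cons, if_neg (by simp [hc])]
      cases hs : pvSplitSp r with
      | nil => exact absurd hs (pvSplitSp_ne_nil r)
      | cons p ps =>
        have hhead : p = r.takeWhile (fun c => !(c == ' ')) := by
          have := pvHead_splitSp r; rw [hs] at this; simpa using this
        rw [List.takeWhile_cons, if_pos (by simp [hc])]
        simp [List.find?, hhead]

/-- modify the last piece by appending a char -/
def pvModLast (c : Char) : List (List Char) → List (List Char)
  | [] => []
  | [p] => [p ++ [c]]
  | p :: q :: ps => p :: pvModLast c (q :: ps)

theorem pvModLast_append (c : Char) (ys : List (List Char)) (y : List Char) :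
    pvModLast c (ys ++ [y]) = ys ++ [y ++ [c]] := by
  induction ys with
  | nil => simp [pvModLast]
  | cons z zs ih =>
    cases zs with
    | nil => simp [pvModLast]
    | cons w ws =>
      simp only [List.cons_append, pvModLast]
      exact congrArg (List.cons z) ih

theorem pvSplitSp_append (xs : List Char) (c : Char) :
    pvSplitSp (xs ++ [c])
      = if c = ' ' then pvSplitSp xs ++ [[]] else pvModLast c (pvSplitSp xs) := by
  induction xs with
  | nil =>
    by_cases hc : c = ' ' <;> simp [pvSplitSp, pvModLast, hc]
  | cons x xs ih =>
    simp only [List.cons_append, pvSplitSp]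
    by_cases hx : x = ' '
    · rw [if_pos hx, ih]
      by_cases hc : c = ' '
      · simp [hc, hx]
      · rw [if_neg hc, if_neg hc]
        simp only [if_pos hx]
        cases hs : pvSplitSp xs with
        | nil => exact absurd hs (pvSplitSp_ne_nil xs)
        | cons p ps => simp [pvModLast]
    · rw [if_neg hx, ih]
      by_cases hc : c = ' '
      · rw [if_pos hc, if_pos hc]
        cases hs : pvSplitSp xs with
        | nil => exact absurd hs (pvSplitSp_ne_nil xs)
        | cons p ps =>
          simp only [if_neg hx, List.cons_append]
      · rw [if_neg hc, if_neg hc]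
        cases hs : pvSplitSp xs with
        | nil => exact absurd hs (pvSplitSp_ne_nil xs)
        | cons p ps =>
          simp only [if_neg hx]
          cases ps with
          | nil => simp [pvModLast]
          | cons q qs => simp [pvModLast]

theorem pvSplitSp_reverse (cs : List Char) :
    pvSplitSp cs.reverse = ((pvSplitSp cs).map List.reverse).reverse := by
  induction cs with
  | nil => simp [pvSplitSp]
  | cons c cs ih =>
    rw [List.reverse_cons, pvSplitSp_append, ih]
    simp only [pvSplitSp]
    by_cases hc : c = ' '
    · simp [hc]
    · rw [if_neg hc, if_neg hc]
      cases hs : pvSplitSp cs with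
      | nil => exact absurd hs (pvSplitSp_ne_nil cs)
      | cons p ps =>
        simp [pvModLast_append]

theorem pvFind_reverse (cs : List Char) :
    (((pvSplitSp cs).reverse.find? (fun p => !p.isEmpty)).getD [])
      = ((cs.reverse.dropWhile (fun c => c == ' ')).takeWhile
          (fun c => !(c == ' '))).reverse := by
  have h := pvFind_splitSp cs.reverse
  rw [pvSplitSp_reverse] at h
  rw [← List.map_reverse, List.find?_map] at h
  have hcomp : ((fun p : List Char => !p.isEmpty) ∘ List.reverse)
      = (fun p : List Char => !p.isEmpty) := by
    funext p; simp
  rw [hcomp] at h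
  cases hf : (pvSplitSp cs).reverse.find? (fun p => !p.isEmpty) with
  | none => rw [hf] at h; simpa using h.symm
  | some s =>
    rw [hf] at h
    simp only [Option.map_some, Option.getD_some] at h ⊢
    rw [← h, List.reverse_reverse]

/-- move A's String-level fold to the char level -/
theorem pvFold_map (l : List (List Char)) : ∀ (init : List Char),
    (l.map String.ofList).foldl (fun tok s => if s = "" then tok else s)
        (String.ofList init)
      = String.ofList (l.foldl (fun tok s => if s = [] then tok else s) init) := by
  induction l with
  | nil => intro init; simp
  | cons x xs ih =>
    intro init
    simp only [List.map_cons, List.foldl_cons]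
    by_cases hx : x = []
    · subst hx
      rw [if_pos rfl, if_pos rfl]
      exact ih init
    · rw [if_neg (by simpa [String.ofList_eq_empty_iff] using hx), if_neg hx]
      exact ih x

-- ===== VERDICT (by name: the statement is the Claim_ definition above) =====
theorem get_latest_tok_spec : Claim_equal_get_latest_tok := by
  intro line _
  unfold Spec_get_latest_tok get_latest_tok get_latest_tok_alt pvRstripSpace pvAfterLastSpace
  rw [show PySem.Str.split? line " "
      = some ((PySem.Chars.splitOn line.toList [' ']).map String.ofList) by
    simp [PySem.Str.split?, PySem.Chars.split?]]
  simp only [Option.getD_some, pvSplitOn_space]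
  rw [show ("" : String) = String.ofList [] by rfl, pvFold_map,
    pvFold_eq_find, pvFind_reverse]
  simp
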